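-- pv_equiv track=rewrite | github.com/ibm-ecosystem-engineering/SuperKnowa | 8. Deploy & Infer/Backend/src/solr/ProcessSolr.py | skip_unwanted_characters
-- ===== SOURCE A (Python) =====
-- def skip_unwanted_characters(document, keyword):
--     lines = document.split('\n')
--     desired_text = ""
--     last_occurrence = -1
--     for i, line in enumerate(lines):
--         if keyword in line:
--             last_occurrence = i
--
--     if last_occurrence != -1:
--         for line in lines[last_occurrence+1:]:
--             desired_text += line.strip() + "\n"
--     else:
--         desired_text = document
--
--     return desired_text.strip()
-- ===== SOURCE B (Python) =====
-- def skip_unwanted_characters(document, keyword):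
--     acc = []
--     found = False
--     for line in document.split('\n'):
--         if keyword in line:
--             found = True
--             acc = []
--         else:
--             acc.append(line.strip())
--     return '\n'.join(acc).strip() if found else document.strip()
-- ===== Notes on version B (the rewrite author's own statement) =====
-- stated objective: simpler
-- what changed: A finds the last keyword line with an enumerate pass, slices the line list and rescans the suffix, concatenating stripped lines with trailing newlines; B does one streaming pass keeping an accumulator of stripped lines that it resets whenever a line contains the keyword, then joins, with a found flag distinguishing the no-match fallback.
import Mathlib
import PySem

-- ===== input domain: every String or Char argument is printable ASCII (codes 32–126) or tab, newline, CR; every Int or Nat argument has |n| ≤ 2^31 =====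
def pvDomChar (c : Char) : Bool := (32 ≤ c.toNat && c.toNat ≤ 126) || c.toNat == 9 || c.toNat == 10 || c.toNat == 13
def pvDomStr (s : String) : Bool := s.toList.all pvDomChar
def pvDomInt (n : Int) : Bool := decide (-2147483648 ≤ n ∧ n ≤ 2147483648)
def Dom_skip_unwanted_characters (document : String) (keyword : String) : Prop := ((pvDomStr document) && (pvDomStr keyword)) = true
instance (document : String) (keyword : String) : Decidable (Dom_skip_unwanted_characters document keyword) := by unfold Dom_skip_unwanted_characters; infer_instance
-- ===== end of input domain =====

-- B replaces A's find-last-index-then-slice-and-rescan by a single streaming pass with a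
-- reset-on-keyword accumulator (objective: simpler, one loop instead of two).

-- ===== PORT A =====
-- the first loop of A: last index whose line contains the keyword, -1 if none
def pvLastOcc (keyword : String) (lines : List String) : Int :=
  (PySem.List.enumerate lines).foldl
    (fun last_occurrence p => if PySem.Str.isIn keyword p.2 then p.1 else last_occurrence) (-1)

def skip_unwanted_characters (document : String) (keyword : String) : String :=
  let lines := (PySem.Str.split? document "\n").getD []
  let last_occurrence := pvLastOcc keyword lines
  let desired_text :=
    if last_occurrence ≠ -1 then
      (PySem.List.slice lines (some (last_occurrence + 1)) none).foldl
        (fun desired_text line => desired_text ++ PySem.Str.strip line ++ "\n") ""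
    else document
  PySem.Str.strip desired_text

-- ===== PORT B =====
-- B's single pass: the accumulator of stripped lines is reset whenever a line contains the keyword
def pvScan (keyword : String) (lines : List String) : List String × Bool :=
  lines.foldl
    (fun st line =>
      if PySem.Str.isIn keyword line then ([], true)
      else (st.1 ++ [PySem.Str.strip line], st.2))
    ([], false)

def skip_unwanted_characters_alt (document : String) (keyword : String) : String :=
  let st := pvScan keyword ((PySem.Str.split? document "\n").getD [])
  if st.2 then PySem.Str.strip (PySem.Str.join "\n" st.1) else PySem.Str.strip document

-- ===== PRECONDITION & SPEC =====
def Spec_skip_unwanted_characters (document : String) (keyword : String) (out : String) : Prop := out = skip_unwanted_characters_alt document keyword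
instance (document : String) (keyword : String) (out : String) : Decidable (Spec_skip_unwanted_characters document keyword out) := by unfold Spec_skip_unwanted_characters; infer_instance

-- ===== CLAIM (what is proved, stated in full; the proofs are below) =====
def Claim_equal_skip_unwanted_characters : Prop := ∀ (document : String) (keyword : String), Dom_skip_unwanted_characters document keyword → Spec_skip_unwanted_characters document keyword (skip_unwanted_characters document keyword)

-- ===== LEMMAS AND PROOFS =====

-- A's first loop, read from the right end
lemma pvLastOcc_snoc (kw x : String) (ls : List String) :
    pvLastOcc kw (ls ++ [x]) =
      if PySem.Str.isIn kw x then (ls.length : Int) else pvLastOcc kw ls := by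
  unfold pvLastOcc
  rw [PySem.List.enumerate_append, List.foldl_append]
  simp [PySem.List.enumerate]

lemma pvLastOcc_nil (kw : String) : pvLastOcc kw [] = -1 := by
  simp [pvLastOcc, PySem.List.enumerate]

-- invariant tying A's last-occurrence index to B's scan state
lemma pvScan_inv (kw : String) (ls : List String) :
    (pvLastOcc kw ls = -1 → pvScan kw ls = (ls.map PySem.Str.strip, false)) ∧
    (pvLastOcc kw ls ≠ -1 →
      0 ≤ pvLastOcc kw ls ∧ (pvLastOcc kw ls).toNat < ls.length ∧
      pvScan kw ls = ((ls.drop ((pvLastOcc kw ls).toNat + 1)).map PySem.Str.strip, true)) := by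
  induction ls using List.reverseRecOn with
  | nil => simp [pvLastOcc_nil, pvScan]
  | append_singleton ls x ih =>
    have hfold : pvScan kw (ls ++ [x]) =
        (fun st line =>
          if PySem.Str.isIn kw line then (([] : List String), true)
          else (st.1 ++ [PySem.Str.strip line], st.2)) (pvScan kw ls) x := by
      unfold pvScan; rw [List.foldl_append]; rfl
    rw [pvLastOcc_snoc]
    cases hx : PySem.Str.isIn kw x with
    | true =>
      rw [if_pos rfl]
      constructor
      · intro h
        exact absurd h (by omega)
      · intro _
        refine ⟨by omega, ?_, ?_⟩
        · simp only [Int.toNat_natCast, List.length_append, List.length_singleton]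
          omega
        · rw [hfold]
          simp only [hx]
          have hdrop : (ls ++ [x]).drop ((↑ls.length : Int).toNat + 1) = [] := by
            apply List.drop_eq_nil_of_le
            simp
          rw [hdrop]
          simp
    | false =>
      rw [if_neg (by simp)]
      by_cases h1 : pvLastOcc kw ls = -1
      · constructor
        · intro _
          rw [hfold, ih.1 h1]
          simp only [hx]
          simp
        · intro h
          exact absurd h1 h
      · obtain ⟨h0, hlt, hst⟩ := ih.2 h1
        constructor
        · intro h
          exact absurd h h1
        · intro _
          refine ⟨h0, ?_, ?_⟩
          · simp only [List.length_append, List.length_singleton]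
            omega
          · rw [hfold, hst]
            simp only [hx]
            rw [if_neg (by simp)]
            rw [List.drop_append_of_le_length (by omega)]
            simp

lemma pv_rstrip_newline (cs : List Char) :
    PySem.Chars.rstrip (cs ++ ['\n']) = PySem.Chars.rstrip cs := by
  simp [PySem.Chars.rstrip, PySem.Chars.isspace]

lemma pv_strip_newline (cs : List Char) :
    PySem.Chars.strip (cs ++ ['\n']) = PySem.Chars.strip cs := by
  unfold PySem.Chars.strip PySem.Chars.lstrip
  rw [List.dropWhile_append]
  by_cases h : (List.dropWhile PySem.Chars.isspace cs).isEmpty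
  · simp only [h, if_pos]
    rw [List.isEmpty_iff] at h
    rw [h]
    simp [PySem.Chars.isspace, PySem.Chars.rstrip]
  · simp only [h]
    exact pv_rstrip_newline _

-- A's concatenation loop, pushed to lists of characters
lemma pv_foldl_toList (ys : List String) (a : String) :
    (ys.foldl (fun desired_text line => desired_text ++ PySem.Str.strip line ++ "\n") a).toList =
      a.toList ++ (ys.map (fun l => (PySem.Str.strip l).toList ++ ['\n'])).flatten := by
  induction ys generalizing a with
  | nil => simp
  | cons y ys ih =>
    simp only [List.foldl_cons, List.map_cons, List.flatten_cons, ih]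
    simp [String.toList_append]

lemma pv_flatten_eq_join (zs : List (List Char)) (h : zs ≠ []) :
    (zs.map (· ++ ['\n'])).flatten = PySem.Chars.join ['\n'] zs ++ ['\n'] := by
  induction zs with
  | nil => exact absurd rfl h
  | cons z zs ih =>
    cases zs with
    | nil => rw [PySem.Chars.join_singleton]; simp
    | cons w ws =>
      rw [List.map_cons, List.flatten_cons, ih (by simp), PySem.Chars.join_cons_cons]
      simp

lemma pv_strip_flatten (zs : List (List Char)) :
    PySem.Chars.strip ((zs.map (· ++ ['\n'])).flatten) =
      PySem.Chars.strip (PySem.Chars.join ['\n'] zs) := by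
  by_cases h : zs = []
  · rw [h, PySem.Chars.join_nil]
    rfl
  · rw [pv_flatten_eq_join zs h, pv_strip_newline]

-- ===== VERDICT (by name: the statement is the Claim_ definition above) =====
theorem skip_unwanted_characters_spec : Claim_equal_skip_unwanted_characters := by
  intro document keyword _
  unfold Spec_skip_unwanted_characters skip_unwanted_characters skip_unwanted_characters_alt
  set ls := (PySem.Str.split? document "\n").getD [] with hls
  by_cases h : pvLastOcc keyword ls = -1
  · have hst := (pvScan_inv keyword ls).1 h
    simp [h, hst]
  · obtain ⟨h0, hlt, hst⟩ := (pvScan_inv keyword ls).2 h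
    simp only [h, hst, ne_eq, not_false_eq_true, if_pos]
    have hslice : PySem.List.slice ls (some (pvLastOcc keyword ls + 1)) none =
        ls.drop ((pvLastOcc keyword ls).toNat + 1) := by
      rw [PySem.List.slice_from ls (a := pvLastOcc keyword ls + 1) (by omega)]
      congr 1
      omega
    apply String.toList_inj.mp
    rw [hslice, PySem.Str.toList_strip, PySem.Str.toList_strip, pv_foldl_toList,
      PySem.Str.toList_join]
    have hmm : (ls.drop ((pvLastOcc keyword ls).toNat + 1)).map
        (fun l => (PySem.Str.strip l).toList ++ ['\n']) =
        ((ls.drop ((pvLastOcc keyword ls).toNat + 1)).map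
          (fun l => (PySem.Str.strip l).toList)).map (· ++ ['\n']) := by
      simp only [List.map_map]
      rfl
    simp only [String.toList_empty, List.nil_append, hmm]
    rw [pv_strip_flatten]
    have hsep : ("\n" : String).toList = ['\n'] := rfl
    rw [hsep]
    congr 1
    simp only [List.map_map]
    rfl
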